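-- pv_equiv track=rewrite | github.com/fl-sean03/pcp | scripts/core_sync.py | parse_people_md
-- ===== SOURCE A (Python) =====
-- from typing import Any, Dict, List, Optional, Tuple
--
-- def parse_people_md(content: str) -> List[Dict]:
--     """Parse PEOPLE.md into structured data."""
--     people = []
--     current_person = None
--
--     lines = content.split("\n")
--     for line in lines:
--         if line.startswith("### "):
--             if current_person:
--                 people.append(current_person)
--             name = line[4:].strip()
--             current_person = {"name": name, "organization": "", "relationship": "", "context": ""}
--
--         elif current_person and "|" in line and "---" not in line:
--             parts = [p.strip() for p in line.split("|")]
--             if len(parts) >= 3: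
--                 field = parts[1].replace("**", "").lower()
--                 value = parts[2].replace("**", "")
--
--                 if "institution" in field or "organization" in field:
--                     current_person["organization"] = value
--                 elif "role" in field:
--                     current_person["relationship"] = value
--                 elif "relationship" in field:
--                     current_person["context"] = value
--
--     if current_person:
--         people.append(current_person)
--
--     return people
-- ===== SOURCE B (Python) =====
-- def _split_block(lines):
--     """Collect lines up to (not including) the first '### ' header; return (body, remainder)."""
--     body = []
--     for l in lines:
--         if l.startswith("### "):
--             break
--         body.append(l)
--     return body, lines[len(body):]
--
--
-- def _person(header, body):
--     """Build one person dict from its header line and the lines of its block."""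
--     org = rel = ctx = ""
--     for line in body:
--         if "|" in line and "---" not in line:
--             parts = [p.strip() for p in line.split("|")]
--             if len(parts) >= 3:
--                 field = parts[1].replace("**", "").lower()
--                 value = parts[2].replace("**", "")
--                 if "institution" in field or "organization" in field:
--                     org = value
--                 elif "role" in field:
--                     rel = value
--                 elif "relationship" in field:
--                     ctx = value
--     return {"name": header[4:].strip(),
--             "organization": org,
--             "relationship": rel,
--             "context": ctx}
--
--
-- def parse_people_md(content):
--     """Parse PEOPLE.md into structured data (segment into header blocks, then parse each block)."""
--     _, rest = _split_block(content.split("\n"))  # discard pre-header lines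
--     people = []
--     while rest:
--         header, tail = rest[0], rest[1:]
--         body, rest = _split_block(tail)
--         people.append(_person(header, body))
--     return people
-- ===== Notes on version B (the rewrite author's own statement) =====
-- stated objective: alternative
-- what changed: A's single accumulate-and-flush loop with a mutable current-person dict is replaced by a segmentation pass that splits the lines into header-led blocks, followed by an independent per-block parse into (org, rel, ctx) accumulators.
import Mathlib
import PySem

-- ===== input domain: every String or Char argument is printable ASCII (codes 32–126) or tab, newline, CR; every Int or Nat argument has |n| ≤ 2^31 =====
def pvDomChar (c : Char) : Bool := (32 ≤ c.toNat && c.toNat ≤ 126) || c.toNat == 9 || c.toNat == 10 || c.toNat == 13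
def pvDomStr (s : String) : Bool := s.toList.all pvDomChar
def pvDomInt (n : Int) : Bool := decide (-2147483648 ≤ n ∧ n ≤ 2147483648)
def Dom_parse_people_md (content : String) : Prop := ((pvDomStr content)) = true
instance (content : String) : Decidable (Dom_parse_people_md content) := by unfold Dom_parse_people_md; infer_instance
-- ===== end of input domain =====

-- B segments the lines into '### '-led blocks and parses each block independently; same output as A's single flush loop.

-- ===== PORT A =====
-- A's loop state: (people so far, current_person); each person dict is kept as a PySem.Dict.
def pvStepA (st : List (List (String × String)) × Option (PySem.Dict String String)) (line : String) :
    List (List (String × String)) × Option (PySem.Dict String String) :=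
  if PySem.Str.startswith line "### " then
    let people := match st.2 with
      | some p => st.1 ++ [p.items]
      | none => st.1
    let name := PySem.Str.strip (PySem.Str.slice line (some 4) none)
    (people, some (PySem.Dict.mk [("name", name), ("organization", ""), ("relationship", ""), ("context", "")]))
  else
    match st.2 with
    | none => st
    | some cur =>
      -- Python's 'current_person and …': an empty dict would be falsy (never happens here)
      if cur.items.isEmpty then st
      else if PySem.Str.isIn "|" line && !(PySem.Str.isIn "---" line) then
        let parts := ((PySem.Str.split? line "|").getD []).map PySem.Str.strip
        match parts with
        | _ :: p1 :: p2 :: _ =>  -- len(parts) >= 3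
          let field := PySem.Str.lower (PySem.Str.replace p1 "**" "")
          let value := PySem.Str.replace p2 "**" ""
          if PySem.Str.isIn "institution" field || PySem.Str.isIn "organization" field then
            (st.1, some (cur.insert "organization" value))
          else if PySem.Str.isIn "role" field then
            (st.1, some (cur.insert "relationship" value))
          else if PySem.Str.isIn "relationship" field then
            (st.1, some (cur.insert "context" value))
          else (st.1, some cur)
        | _ => (st.1, some cur)
      else (st.1, some cur)

def parse_people_md (content : String) : List (List (String × String)) :=
  let lines := (PySem.Str.split? content "\n").getD []
  let st := lines.foldl pvStepA ([], none)
  match st.2 with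
  | some p => st.1 ++ [p.items]
  | none => st.1

-- ===== PORT B =====
-- _split_block: lines before the first '### ' header, and the remainder starting at that header.
def pvSplitBlock : List String → List String × List String
  | [] => ([], [])
  | l :: ls =>
    if PySem.Str.startswith l "### " then ([], l :: ls)
    else
      let br := pvSplitBlock ls
      (l :: br.1, br.2)

-- one table-row step of _person's loop over the block body, state (org, rel, ctx)
def pvFieldStep (acc : String × String × String) (line : String) : String × String × String :=
  if PySem.Str.isIn "|" line && !(PySem.Str.isIn "---" line) then
    let parts := ((PySem.Str.split? line "|").getD []).map PySem.Str.strip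
    match parts with
    | _ :: p1 :: p2 :: _ =>
      let field := PySem.Str.lower (PySem.Str.replace p1 "**" "")
      let value := PySem.Str.replace p2 "**" ""
      if PySem.Str.isIn "institution" field || PySem.Str.isIn "organization" field then
        (value, acc.2.1, acc.2.2)
      else if PySem.Str.isIn "role" field then
        (acc.1, value, acc.2.2)
      else if PySem.Str.isIn "relationship" field then
        (acc.1, acc.2.1, value)
      else acc
    | _ => acc
  else acc

def pvPersonB (header : String) (body : List String) : List (String × String) :=
  let st := body.foldl pvFieldStep ("", "", "")
  [("name", PySem.Str.strip (PySem.Str.slice header (some 4) none)),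
   ("organization", st.1), ("relationship", st.2.1), ("context", st.2.2)]

theorem pvSplitBlock_len (ls : List String) : (pvSplitBlock ls).2.length ≤ ls.length := by
  induction ls with
  | nil => simp [pvSplitBlock]
  | cons l ls ih =>
    simp only [pvSplitBlock]
    split
    · simp
    · simpa using Nat.le_succ_of_le ih

-- the while loop of B's parse_people_md: consume one header + its block per iteration
def pvBlocks : List String → List (List (String × String))
  | [] => []
  | l :: ls =>
    let br := pvSplitBlock ls
    pvPersonB l br.1 :: pvBlocks br.2
termination_by ls => ls.length
decreasing_by
  simpa using Nat.lt_succ_of_le (pvSplitBlock_len ls)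

def parse_people_md_alt (content : String) : List (List (String × String)) :=
  let lines := (PySem.Str.split? content "\n").getD []
  pvBlocks (pvSplitBlock lines).2

-- ===== PRECONDITION & SPEC =====
def Spec_parse_people_md (content : String) (out : List (List (String × String))) : Prop := out = parse_people_md_alt content
instance (content : String) (out : List (List (String × String))) : Decidable (Spec_parse_people_md content out) := by unfold Spec_parse_people_md; infer_instance

-- ===== CLAIM (what is proved, stated in full; the proofs are below) =====
def Claim_equal_parse_people_md : Prop := ∀ (content : String), Dom_parse_people_md content → Spec_parse_people_md content (parse_people_md content)

-- ===== LEMMAS AND PROOFS =====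

-- a person dict of A always has exactly this shape
def mkP (n o r c : String) : PySem.Dict String String :=
  PySem.Dict.mk [("name", n), ("organization", o), ("relationship", r), ("context", c)]

def pvFinish (st : List (List (String × String)) × Option (PySem.Dict String String)) :
    List (List (String × String)) :=
  match st.2 with
  | some p => st.1 ++ [p.items]
  | none => st.1

theorem insert_org (n o r c v : String) : (mkP n o r c).insert "organization" v = mkP n v r c := by
  simp [mkP, PySem.Dict.insert]

theorem insert_rel (n o r c v : String) : (mkP n o r c).insert "relationship" v = mkP n o v c := by
  simp [mkP, PySem.Dict.insert]

theorem insert_ctx (n o r c v : String) : (mkP n o r c).insert "context" v = mkP n o r v := by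
  simp [mkP, PySem.Dict.insert]

theorem stepA_nonheader (line : String) (h : PySem.Str.startswith line "### " = false)
    (acc : List (List (String × String))) (n o r c : String) :
    pvStepA (acc, some (mkP n o r c)) line =
      (acc, some (mkP n (pvFieldStep (o, r, c) line).1 (pvFieldStep (o, r, c) line).2.1
                      (pvFieldStep (o, r, c) line).2.2)) := by
  have hne : (mkP n o r c).items.isEmpty = false := rfl
  simp only [pvStepA, pvFieldStep, h, Bool.false_eq_true, if_false, hne]
  cases hg : (PySem.Str.isIn "|" line && !(PySem.Str.isIn "---" line)) with
  | false => rfl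
  | true =>
    cases hp : ((PySem.Str.split? line "|").getD []).map PySem.Str.strip with
    | nil => simp
    | cons a t =>
      cases t with
      | nil => simp
      | cons p1 t2 =>
        cases t2 with
        | nil => simp
        | cons p2 t3 =>
          simp only [hg, if_true, hp]
          split_ifs <;> simp [insert_org, insert_rel, insert_ctx]

-- processing one block body then the rest, starting inside a person
theorem block_lemma : ∀ (ls : List String) (acc : List (List (String × String))) (n o r c : String),
    pvFinish (ls.foldl pvStepA (acc, some (mkP n o r c))) =
      acc ++ [[("name", n),
               ("organization", ((pvSplitBlock ls).1.foldl pvFieldStep (o, r, c)).1),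
               ("relationship", ((pvSplitBlock ls).1.foldl pvFieldStep (o, r, c)).2.1),
               ("context", ((pvSplitBlock ls).1.foldl pvFieldStep (o, r, c)).2.2)]]
        ++ pvBlocks (pvSplitBlock ls).2 := by
  intro ls
  induction ls with
  | nil => intro acc n o r c; simp [pvFinish, pvSplitBlock, pvBlocks, mkP]
  | cons l ls ih =>
    intro acc n o r c
    cases h : PySem.Str.startswith l "### " with
    | true =>
      simp only [List.foldl_cons, pvStepA, h, if_true]
      rw [show (PySem.Dict.mk [("name", PySem.Str.strip (PySem.Str.slice l (some 4) none)),
            ("organization", ""), ("relationship", ""), ("context", "")]) =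
            mkP (PySem.Str.strip (PySem.Str.slice l (some 4) none)) "" "" "" from rfl]
      rw [ih]
      have hsb : pvSplitBlock (l :: ls) = ([], l :: ls) := by
        simp only [pvSplitBlock, h, if_true]
      rw [hsb]
      simp [pvBlocks, pvPersonB, mkP, PySem.Dict.items]
    | false =>
      have hsb : pvSplitBlock (l :: ls) = (l :: (pvSplitBlock ls).1, (pvSplitBlock ls).2) := by
        simp only [pvSplitBlock, h, Bool.false_eq_true, if_false]
      simp only [List.foldl_cons]
      rw [stepA_nonheader l h, ih, hsb]
      simp

-- the preamble (before any header) leaves A's state untouched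
theorem main_lemma : ∀ (ls : List String) (acc : List (List (String × String))),
    pvFinish (ls.foldl pvStepA (acc, none)) = acc ++ pvBlocks (pvSplitBlock ls).2 := by
  intro ls
  induction ls with
  | nil => intro acc; simp [pvFinish, pvSplitBlock, pvBlocks]
  | cons l ls ih =>
    intro acc
    cases h : PySem.Str.startswith l "### " with
    | true =>
      simp only [List.foldl_cons, pvStepA, h, if_true]
      rw [show (PySem.Dict.mk [("name", PySem.Str.strip (PySem.Str.slice l (some 4) none)),
            ("organization", ""), ("relationship", ""), ("context", "")]) =
            mkP (PySem.Str.strip (PySem.Str.slice l (some 4) none)) "" "" "" from rfl]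
      rw [block_lemma ls acc]
      have hsb : pvSplitBlock (l :: ls) = ([], l :: ls) := by
        simp only [pvSplitBlock, h, if_true]
      rw [hsb]
      simp [pvBlocks, pvPersonB]
    | false =>
      have hsb : pvSplitBlock (l :: ls) = (l :: (pvSplitBlock ls).1, (pvSplitBlock ls).2) := by
        simp only [pvSplitBlock, h, Bool.false_eq_true, if_false]
      simp only [List.foldl_cons, pvStepA, h, Bool.false_eq_true, if_false]
      rw [ih, hsb]

-- ===== VERDICT (by name: the statement is the Claim_ definition above) =====
theorem parse_people_md_spec : Claim_equal_parse_people_md := by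
  intro content _
  show parse_people_md content = parse_people_md_alt content
  unfold parse_people_md parse_people_md_alt
  simpa [pvFinish] using main_lemma ((PySem.Str.split? content "\n").getD []) []
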